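-- pv_equiv track=rewrite | github.com/eavookindroid/consilium-agent-tui | lib/consilium/app.py | _normalize_text_for_display
-- ===== SOURCE A (Python) =====
-- def _normalize_text_for_display(text: str) -> str:
--     """
--     Normalize text for RichLog display with smart code block detection.
--
--     Problem: RichLog may truncate text after double newlines.
--     Solution: Preserve double newlines inside markdown code blocks (```),
--              normalize them elsewhere to prevent UI truncation.
--     """
--     if '```' not in text:
--         # Fast path: no code blocks, safe to normalize
--         return text.replace('\n\n', '\n')
--
--     # Split text into segments by code block markers
--     segments = []
--     current_pos = 0
--     in_code_block = False
--
--     while current_pos < len(text):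
--         marker_pos = text.find('```', current_pos)
--
--         if marker_pos == -1:
--             # No more markers, take the rest
--             segment = text[current_pos:]
--             if in_code_block:
--                 # Inside code block - preserve formatting
--                 segments.append(segment)
--             else:
--                 # Outside code block - normalize
--                 segments.append(segment.replace('\n\n', '\n'))
--             break
--
--         # Found marker - process segment before it
--         segment = text[current_pos:marker_pos]
--         if in_code_block:
--             # Inside code block - preserve formatting
--             segments.append(segment)
--         else:
--             # Outside code block - normalize
--             segments.append(segment.replace('\n\n', '\n'))
--
--         # Add the marker itself
--         segments.append('```')
--
--         # Toggle state and move past marker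
--         in_code_block = not in_code_block
--         current_pos = marker_pos + 3
--
--     return ''.join(segments)
-- ===== SOURCE B (Python) =====
-- def _normalize_text_for_display(text: str) -> str:
--     # Single-pass character automaton: walk the text once, toggling a code-block
--     # flag on each ``` fence and collapsing '\n\n' pairs on the fly while outside
--     # a fence. No searching, slicing or str.replace; one cursor, one state bit.
--     out = []
--     in_code = False
--     i = 0
--     n = len(text)
--     while i < n:
--         if text.startswith('```', i):
--             out.append('```')
--             in_code = not in_code
--             i += 3
--         elif not in_code and text[i] == '\n' and i + 1 < n and text[i + 1] == '\n':
--             out.append('\n')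
--             i += 2
--         else:
--             out.append(text[i])
--             i += 1
--     return ''.join(out)
-- ===== Notes on version B (the rewrite author's own statement) =====
-- stated objective: alternative
-- what changed: Replaces A's staged find/slice/str.replace segment machine with a single-pass character-level automaton: one cursor walks the text once, toggling an in-code flag at each triple-backtick fence and collapsing double-newline pairs on the fly outside fences, with no searching, slicing or replace subroutine.
import Mathlib
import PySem

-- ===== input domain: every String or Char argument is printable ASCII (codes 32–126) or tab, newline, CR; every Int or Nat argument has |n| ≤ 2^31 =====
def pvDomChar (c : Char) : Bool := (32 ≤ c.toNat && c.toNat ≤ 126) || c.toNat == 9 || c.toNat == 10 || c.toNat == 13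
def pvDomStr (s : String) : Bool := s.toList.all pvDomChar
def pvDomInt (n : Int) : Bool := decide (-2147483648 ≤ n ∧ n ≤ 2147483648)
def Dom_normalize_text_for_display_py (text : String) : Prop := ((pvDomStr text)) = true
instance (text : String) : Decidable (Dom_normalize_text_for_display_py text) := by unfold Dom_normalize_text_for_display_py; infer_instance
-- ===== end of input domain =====

-- B replaces A's staged find/slice/str.replace segment machine by a single-pass
-- character-level automaton (one cursor, one in-code flag, newline pairs collapsed
-- on the fly); return values proved equal.

-- shared string literals as char lists
def pvSep : List Char := ['`', '`', '`']
def pvNN : List Char := ['\n', '\n']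
def pvN : List Char := ['\n']

-- ===== PORT A =====
-- the while loop of A: state (current_pos, in_code_block, segments)
def aLoop (text : List Char) (pos : Nat) (inCode : Bool) (segments : List (List Char)) :
    List (List Char) :=
  if h : pos < text.length then
    let m : Int := PySem.Chars.findFrom text pvSep (pos : Int)
    if hm : m = -1 then
      let seg := PySem.Chars.slice text (some (pos : Int)) none
      segments ++ [if inCode then seg else PySem.Chars.replace seg pvNN pvN]
    else
      let seg := PySem.Chars.slice text (some (pos : Int)) (some m)
      aLoop text (m.toNat + 3) (!inCode)
        ((segments ++ [if inCode then seg else PySem.Chars.replace seg pvNN pvN]) ++ [pvSep])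
  else segments
termination_by text.length - pos
decreasing_by
  have hspec := PySem.Chars.findFrom_natCast_spec text pvSep pos (Nat.le_of_lt h) hm
  have h0 : (pos : Int) ≤ PySem.Chars.findFrom text pvSep (pos : Int) := hspec.1
  omega

def normalize_text_for_display_py (text : String) : String :=
  if PySem.Str.isIn "```" text = false then
    PySem.Str.replace text "\n\n" "\n"
  else
    String.ofList (PySem.Chars.join [] (aLoop text.toList 0 false []))

-- ===== PORT B =====
-- the while loop of B: the remaining suffix text[i:] stands for the cursor i;
-- text.startswith('```', i) is pvSep.isPrefixOf on the suffix (exact on ASCII)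
def bLoop (l : List Char) (inCode : Bool) (out : List (List Char)) : List (List Char) :=
  match l with
  | [] => out
  | c :: rest =>
    if pvSep.isPrefixOf (c :: rest) then
      bLoop ((c :: rest).drop 3) (!inCode) (out ++ [pvSep])
    else if inCode = false ∧ c = '\n' ∧ rest.head? = some '\n' then
      bLoop (rest.drop 1) inCode (out ++ [pvN])
    else
      bLoop rest inCode (out ++ [[c]])
termination_by l.length
decreasing_by all_goals (simp; try omega)

def normalize_text_for_display_py_alt (text : String) : String :=
  String.ofList (PySem.Chars.join [] (bLoop text.toList false []))

-- ===== PRECONDITION & SPEC =====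
def Spec_normalize_text_for_display_py (text : String) (out : String) : Prop := out = normalize_text_for_display_py_alt text
instance (text : String) (out : String) : Decidable (Spec_normalize_text_for_display_py text out) := by unfold Spec_normalize_text_for_display_py; infer_instance

-- ===== CLAIM (what is proved, stated in full; the proofs are below) =====
def Claim_equal_normalize_text_for_display_py : Prop := ∀ (text : String), Dom_normalize_text_for_display_py text → Spec_normalize_text_for_display_py text (normalize_text_for_display_py text)

-- ===== LEMMAS AND PROOFS =====

-- reference recursion: the segment list a split at '```' produces, one marker at a time
def splitRec (l : List Char) : List (List Char) :=
  if h : PySem.Chars.find l pvSep = -1 then [l]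
  else
    l.take (PySem.Chars.find l pvSep).toNat ::
      splitRec (l.drop ((PySem.Chars.find l pvSep).toNat + 3))
termination_by l.length
decreasing_by
  have h0 : 0 ≤ PySem.Chars.find l pvSep := by
    have := PySem.Chars.neg_one_le_find l pvSep; omega
  have hpre := (PySem.Chars.find_spec (s := l) (sub := pvSep) h0).1
  have hlen : pvSep.length ≤ (l.drop (PySem.Chars.find l pvSep).toNat).length :=
    hpre.length_le
  simp [pvSep] at hlen
  simp
  omega

lemma splitRec_ne_nil (l : List Char) : splitRec l ≠ [] := by
  rw [splitRec]; split <;> simp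

-- expected output shape: segments joined with '```', normalizing outside-code segments
def gOut (b : Bool) : List (List Char) → List Char
  | [] => []
  | s :: rest =>
    (if b then s else PySem.Chars.replace s pvNN pvN) ++
      (if rest.isEmpty then [] else pvSep ++ gOut (!b) rest)

def mapHead (f : List Char → List Char) : List (List Char) → List (List Char)
  | [] => []
  | s :: t => f s :: t

lemma gOut_head (b : Bool) (x : List Char) (t : List (List Char)) :
    gOut b (x :: t) = (if b then x else PySem.Chars.replace x pvNN pvN) ++
      (if t.isEmpty then [] else pvSep ++ gOut (!b) t) := rfl

-- find s sub is characterized by "first occurrence"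
lemma find_eq_of_first (s sub : List Char) (k : Nat) (h1 : sub <+: s.drop k)
    (h2 : ∀ i < k, ¬ sub <+: s.drop i) : PySem.Chars.find s sub = (k : Int) := by
  have hinf : sub <:+: s := h1.isInfix.trans (List.drop_suffix k s).isInfix
  have hne : PySem.Chars.find s sub ≠ -1 := by
    rw [Ne, PySem.Chars.find_eq_neg_one_iff]; exact fun h => h hinf
  have h0 : 0 ≤ PySem.Chars.find s sub := by
    have := PySem.Chars.neg_one_le_find s sub; omega
  obtain ⟨hp, hmin⟩ := PySem.Chars.find_spec (s := s) (sub := sub) h0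
  rcases Nat.lt_trichotomy (PySem.Chars.find s sub).toNat k with hlt | heq | hgt
  · exact absurd hp (h2 _ hlt)
  · omega
  · exact absurd h1 (hmin k hgt)

lemma find_of_prefix (s sub : List Char) (h : sub <+: s) : PySem.Chars.find s sub = 0 :=
  find_eq_of_first s sub 0 (by simpa) (fun i hi => absurd hi (by omega))

lemma find_cons_neg (c : Char) (rest sub : List Char) (hp : ¬ sub <+: (c :: rest))
    (hr : PySem.Chars.find rest sub = -1) : PySem.Chars.find (c :: rest) sub = -1 := by
  rw [PySem.Chars.find_eq_neg_one_iff] at hr ⊢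
  intro h
  rcases List.infix_cons_iff.mp h with h' | h'
  · exact hp h'
  · exact hr h'

lemma find_cons_succ (c : Char) (rest sub : List Char) (hp : ¬ sub <+: (c :: rest))
    (h0 : 0 ≤ PySem.Chars.find rest sub) :
    PySem.Chars.find (c :: rest) sub = PySem.Chars.find rest sub + 1 := by
  obtain ⟨hpre, hmin⟩ := PySem.Chars.find_spec (s := rest) (sub := sub) h0
  have := find_eq_of_first (c :: rest) sub ((PySem.Chars.find rest sub).toNat + 1)
    (by simpa using hpre)
    (by
      intro i hi
      match i with
      | 0 => simpa using hp
      | j + 1 => simpa using hmin j (by omega))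
  omega

lemma splitRec_cons (c : Char) (rest : List Char) (hp : ¬ pvSep <+: (c :: rest)) :
    splitRec (c :: rest) = mapHead (c :: ·) (splitRec rest) := by
  by_cases hr : PySem.Chars.find rest pvSep = -1
  · conv_lhs => rw [splitRec]
    conv_rhs => rw [splitRec]
    simp [hr, find_cons_neg c rest pvSep hp hr, mapHead]
  · have h0 : 0 ≤ PySem.Chars.find rest pvSep := by
      have := PySem.Chars.neg_one_le_find rest pvSep; omega
    have hc := find_cons_succ c rest pvSep hp h0
    conv_lhs => rw [splitRec]
    conv_rhs => rw [splitRec]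
    have hne : ¬ PySem.Chars.find (c :: rest) pvSep = -1 := by omega
    have htn : (PySem.Chars.find (c :: rest) pvSep).toNat =
        (PySem.Chars.find rest pvSep).toNat + 1 := by omega
    simp only [dif_neg hne, dif_neg hr, htn, mapHead]
    simp [List.drop_succ_cons, List.take_succ_cons]

-- each segment splitRec yields is a prefix of its input
lemma splitRec_prefix (l s : List Char) (t : List (List Char)) (h : splitRec l = s :: t) :
    s <+: l := by
  rw [splitRec] at h
  split at h
  · simp at h; simp [h.1]
  · simp at h; rw [← h.1]; exact List.take_prefix _ _

lemma prefix_head (s r : List Char) (h : s <+: r) (x : Char) (hs : s.head? = some x) :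
    r.head? = some x := by
  obtain ⟨u, rfl⟩ := h
  cases s with
  | nil => simp at hs
  | cons a s' => simp at hs; simp [hs]

-- Chars.replace with pattern '\n\n': a char-level pair-collapse recursion
def nlc (l : List Char) : List Char :=
  match l with
  | [] => []
  | c :: t =>
    if pvNN.isPrefixOf (c :: t) then pvN ++ nlc ((c :: t).drop 2)
    else c :: nlc t
termination_by l.length
decreasing_by all_goals (simp; try omega)

lemma go_eq_nlc (fuel : Nat) : ∀ (l acc : List Char), l.length ≤ fuel →
    PySem.Chars.replace.go pvNN pvN fuel l acc = acc.reverse ++ nlc l := by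
  induction fuel with
  | zero =>
    intro l acc h
    have hl : l = [] := by cases l <;> simp_all
    subst hl
    simp [PySem.Chars.replace.go, nlc]
  | succ fuel ih =>
    intro l acc h
    cases l with
    | nil => simp [PySem.Chars.replace.go, nlc]
    | cons c t =>
      rw [show PySem.Chars.replace.go pvNN pvN (fuel + 1) (c :: t) acc =
          (if pvNN.isPrefixOf (c :: t) then
            PySem.Chars.replace.go pvNN pvN fuel (List.drop pvNN.length (c :: t)) (pvN.reverse ++ acc)
          else PySem.Chars.replace.go pvNN pvN fuel t (c :: acc)) from by
        rw [PySem.Chars.replace.go]]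
      rw [show nlc (c :: t) = (if pvNN.isPrefixOf (c :: t) then pvN ++ nlc ((c :: t).drop 2)
          else c :: nlc t) from by rw [nlc]]
      by_cases hp : pvNN.isPrefixOf (c :: t)
      · rw [if_pos hp, if_pos hp, ih _ _ (by simp [pvNN] at h ⊢; omega)]
        simp [pvN, pvNN]
      · rw [if_neg hp, if_neg hp, ih _ _ (by simp at h; omega)]
        simp

lemma replace_eq_nlc (l : List Char) : PySem.Chars.replace l pvNN pvN = nlc l := by
  rw [PySem.Chars.replace, if_neg (by decide)]
  simpa using go_eq_nlc l.length l [] le_rfl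

-- B's pure scan (what bLoop's flattened output is)
def bScan (l : List Char) (b : Bool) : List Char :=
  match l with
  | [] => []
  | c :: rest =>
    if pvSep.isPrefixOf (c :: rest) then pvSep ++ bScan ((c :: rest).drop 3) (!b)
    else if b = false ∧ c = '\n' ∧ rest.head? = some '\n' then '\n' :: bScan (rest.drop 1) b
    else c :: bScan rest b
termination_by l.length
decreasing_by all_goals (simp; try omega)

lemma bLoop_flatten (n : Nat) : ∀ (l : List Char) (b : Bool) (out : List (List Char)),
    l.length ≤ n → (bLoop l b out).flatten = out.flatten ++ bScan l b := by
  induction n with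
  | zero =>
    intro l b out h
    have hl : l = [] := by cases l <;> simp_all
    subst hl
    rw [bLoop, bScan]; simp
  | succ n ih =>
    intro l b out h
    cases l with
    | nil => rw [bLoop, bScan]; simp
    | cons c rest =>
      rw [bLoop, bScan]
      by_cases hp : pvSep.isPrefixOf (c :: rest)
      · rw [if_pos hp, if_pos hp, ih _ _ _ (by simp at h ⊢; omega)]
        simp
      · rw [if_neg hp, if_neg hp]
        by_cases hc : b = false ∧ c = '\n' ∧ rest.head? = some '\n'
        · rw [if_pos hc, if_pos hc, ih _ _ _ (by simp at h ⊢; omega)]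
          simp [pvN]
        · rw [if_neg hc, if_neg hc, ih _ _ _ (by simp at h; omega)]
          simp

lemma isPrefixOf_pvNN (c : Char) (s : List Char) :
    pvNN.isPrefixOf (c :: s) = (c = '\n' ∧ s.head? = some '\n' : Bool) := by
  cases s with
  | nil => simp [pvNN, List.isPrefixOf]
  | cons d t =>
    by_cases h1 : c = '\n' <;> by_cases h2 : d = '\n'
    · subst h1; subst h2; simp [pvNN, List.isPrefixOf]
    · subst h1
      have h2' : ¬ '\n' = d := fun hh => h2 hh.symm
      simp [pvNN, List.isPrefixOf, h2, h2']
    · subst h2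
      have h1' : ¬ '\n' = c := fun hh => h1 hh.symm
      simp [pvNN, List.isPrefixOf, h1, h1']
    · have h1' : ¬ '\n' = c := fun hh => h1 hh.symm
      simp [pvNN, List.isPrefixOf, h1, h1']

-- the key bridge: A's segment-level output equals B's char-level scan
lemma gOut_eq_bScan (n : Nat) : ∀ (l : List Char) (b : Bool),
    l.length ≤ n → gOut b (splitRec l) = bScan l b := by
  induction n with
  | zero =>
    intro l b h
    have hl : l = [] := by cases l <;> simp_all
    subst hl
    rw [splitRec, bScan]
    simp [show PySem.Chars.find [] pvSep = -1 from by decide, gOut,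
      show PySem.Chars.replace [] pvNN pvN = [] from by decide]
  | succ n ih =>
    intro l b h
    cases l with
    | nil =>
      rw [splitRec, bScan]
      simp [show PySem.Chars.find [] pvSep = -1 from by decide, gOut,
        show PySem.Chars.replace [] pvNN pvN = [] from by decide]
    | cons c rest =>
      rw [bScan]
      by_cases hp : pvSep.isPrefixOf (c :: rest)
      · rw [if_pos hp]
        have hpre : pvSep <+: (c :: rest) := List.isPrefixOf_iff_prefix.mp hp
        have hf : PySem.Chars.find (c :: rest) pvSep = 0 := find_of_prefix _ _ hpre
        have hne : ¬ PySem.Chars.find (c :: rest) pvSep = -1 := by omega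
        rw [splitRec, dif_neg hne, hf]
        rcases hsr : splitRec ((c :: rest).drop ((0 : Int).toNat + 3)) with _ | ⟨s, t⟩
        · exact absurd hsr (splitRec_ne_nil _)
        · have hd : ((0 : Int).toNat + 3) = 3 := by decide
          rw [hd] at hsr
          have hrec := ih ((c :: rest).drop 3) (!b) (by simp at h ⊢; omega)
          rw [hsr] at hrec
          rw [gOut_head, hrec]
          cases b <;>
            simp [show PySem.Chars.replace [] pvNN pvN = [] from by decide]
      · rw [if_neg hp]
        have hpre : ¬ pvSep <+: (c :: rest) := fun hx => hp (List.isPrefixOf_iff_prefix.mpr hx)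
        rw [splitRec_cons c rest hpre]
        by_cases hc : b = false ∧ c = '\n' ∧ rest.head? = some '\n'
        · rw [if_pos hc]
          obtain ⟨hb, hcn, hrn⟩ := hc
          subst hb; subst hcn
          cases rest with
          | nil => simp at hrn
          | cons d rest' =>
            simp at hrn; subst hrn
            have hpr : ¬ pvSep <+: ('\n' :: rest') := by
              intro hx
              obtain ⟨u, hu⟩ := hx
              rw [pvSep] at hu
              injection hu with h1 _
              exact absurd h1 (by decide)
            rw [splitRec_cons '\n' rest' hpr]
            rcases hsr : splitRec rest' with _ | ⟨s, t⟩
            · exact absurd hsr (splitRec_ne_nil _)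
            · have hrec := ih rest' false (by simp at h; omega)
              rw [hsr] at hrec
              simp only [mapHead]
              have hrep : PySem.Chars.replace ('\n' :: '\n' :: s) pvNN pvN =
                  '\n' :: PySem.Chars.replace s pvNN pvN := by
                rw [replace_eq_nlc, replace_eq_nlc]
                rw [show nlc ('\n' :: '\n' :: s) =
                    (if pvNN.isPrefixOf ('\n' :: '\n' :: s) then
                      pvN ++ nlc (('\n' :: '\n' :: s).drop 2)
                    else '\n' :: nlc ('\n' :: s)) from by rw [nlc]]
                rw [if_pos (by simp [pvNN, List.isPrefixOf])]
                simp [pvN]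
              rw [gOut_head, hrep]
              simp only [List.drop_succ_cons, List.drop_zero]
              rw [← hrec, gOut_head]
              simp
        · rw [if_neg hc]
          rcases hsr : splitRec rest with _ | ⟨s, t⟩
          · exact absurd hsr (splitRec_ne_nil _)
          · have hrec := ih rest b (by simp at h; omega)
            rw [hsr] at hrec
            simp only [mapHead]
            rw [gOut_head, ← hrec, gOut_head]
            cases b with
            | true => simp
            | false =>
              have hnp : ¬ pvNN.isPrefixOf (c :: s) = true := by
                rw [isPrefixOf_pvNN]
                simp only [decide_eq_true_eq, not_and]
                intro hcn hsn
                apply hc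
                refine ⟨rfl, hcn, ?_⟩
                exact prefix_head s rest (splitRec_prefix rest s t hsr) '\n' hsn
              have hrep : PySem.Chars.replace (c :: s) pvNN pvN =
                  c :: PySem.Chars.replace s pvNN pvN := by
                rw [replace_eq_nlc, replace_eq_nlc]
                rw [show nlc (c :: s) = (if pvNN.isPrefixOf (c :: s) then
                      pvN ++ nlc ((c :: s).drop 2) else c :: nlc s) from by rw [nlc]]
                rw [if_neg hnp]
              rw [hrep]
              simp

lemma join_nil_flatten (xs : List (List Char)) : PySem.Chars.join [] xs = xs.flatten := by
  induction xs with
  | nil => simp [PySem.Chars.join_nil]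
  | cons x t ih =>
    match t with
    | [] => simp [PySem.Chars.join_singleton]
    | y :: t' => rw [PySem.Chars.join_cons_cons]; simp_all

-- A's loop, read through flattening, produces gOut of the reference segments
lemma aLoop_flatten (text : List Char) (pos : Nat) (hpos : pos ≤ text.length) (b : Bool)
    (segs : List (List Char)) :
    (aLoop text pos b segs).flatten = segs.flatten ++ gOut b (splitRec (text.drop pos)) := by
  rw [aLoop]
  by_cases h : pos < text.length
  · rw [dif_pos h]
    have hff := PySem.Chars.findFrom_natCast text pvSep pos hpos
    by_cases hm : PySem.Chars.find (text.drop pos) pvSep = -1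
    · have hm' : PySem.Chars.findFrom text pvSep (pos : Int) = -1 := by rw [hff, if_pos hm]
      rw [dif_pos hm']
      rw [splitRec, dif_pos hm]
      by_cases hb : b <;>
        simp [gOut, PySem.List.slice_from text (a := (pos : Int)) (by omega), hb]
    · have h0 : 0 ≤ PySem.Chars.find (text.drop pos) pvSep := by
        have := PySem.Chars.neg_one_le_find (text.drop pos) pvSep; omega
      have hm' : PySem.Chars.findFrom text pvSep (pos : Int) =
          (pos : Int) + PySem.Chars.find (text.drop pos) pvSep := by rw [hff, if_neg hm]
      have hne : ¬ PySem.Chars.findFrom text pvSep (pos : Int) = -1 := by omega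
      rw [dif_neg hne]
      have htn : (PySem.Chars.findFrom text pvSep (pos : Int)).toNat =
          pos + (PySem.Chars.find (text.drop pos) pvSep).toNat := by omega
      have hm2 : PySem.Chars.findFrom text pvSep (pos : Int) =
          (((pos + (PySem.Chars.find (text.drop pos) pvSep).toNat : Nat) : Int)) := by omega
      have hseg : PySem.Chars.slice text (some (pos : Int))
            (some (PySem.Chars.findFrom text pvSep (pos : Int))) =
          (text.drop pos).take (PySem.Chars.find (text.drop pos) pvSep).toNat := by
        rw [hm2, PySem.Chars.slice_eq_listSlice, PySem.List.slice_natCast]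
        congr 1
        omega
      have hfit : pos + (PySem.Chars.find (text.drop pos) pvSep).toNat + 3 ≤ text.length := by
        have hpre := (PySem.Chars.find_spec (s := text.drop pos) (sub := pvSep) h0).1
        have hlen := hpre.length_le
        have h3 : pvSep.length = 3 := rfl
        simp only [List.length_drop, h3] at hlen
        omega
      have hrec := aLoop_flatten text
        ((PySem.Chars.findFrom text pvSep (pos : Int)).toNat + 3) (by omega)
        (!b) ((segs ++ [if b then PySem.Chars.slice text (some (pos : Int))
            (some (PySem.Chars.findFrom text pvSep (pos : Int)))
          else PySem.Chars.replace (PySem.Chars.slice text (some (pos : Int))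
            (some (PySem.Chars.findFrom text pvSep (pos : Int)))) pvNN pvN]) ++ [pvSep])
      have hdd : text.drop ((PySem.Chars.findFrom text pvSep (pos : Int)).toNat + 3) =
          (text.drop pos).drop ((PySem.Chars.find (text.drop pos) pvSep).toNat + 3) := by
        rw [List.drop_drop]; congr 1; omega
      rw [hrec, hdd]
      conv_rhs => rw [splitRec, dif_neg hm]
      rcases hsr : splitRec ((text.drop pos).drop
          ((PySem.Chars.find (text.drop pos) pvSep).toNat + 3)) with _ | ⟨s, t⟩
      · exact absurd hsr (splitRec_ne_nil _)
      · simp only [hseg, gOut, List.flatten_append, List.flatten_cons, List.isEmpty_cons]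
        by_cases hb : b <;> simp [hb]
  · rw [dif_neg h]
    have hpe : pos = text.length := by omega
    rw [hpe, List.drop_length, splitRec]
    simp [show PySem.Chars.find [] pvSep = -1 from by decide, gOut,
      show PySem.Chars.replace [] pvNN pvN = [] from by decide]
termination_by text.length - pos
decreasing_by
  have h0 : 0 ≤ PySem.Chars.find (text.drop pos) pvSep := by
    have := PySem.Chars.neg_one_le_find (text.drop pos) pvSep; omega
  omega

lemma str_toList_sep : "```".toList = pvSep := rfl

lemma alt_eq_bScan (text : String) :
    normalize_text_for_display_py_alt text = String.ofList (bScan text.toList false) := by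
  rw [normalize_text_for_display_py_alt, join_nil_flatten,
    bLoop_flatten text.toList.length text.toList false [] le_rfl]
  simp

lemma main_eq (text : String) :
    normalize_text_for_display_py text = normalize_text_for_display_py_alt text := by
  rw [normalize_text_for_display_py, alt_eq_bScan,
    ← gOut_eq_bScan text.toList.length text.toList false le_rfl]
  by_cases hin : PySem.Str.isIn "```" text = false
  · rw [if_pos hin]
    have hninf : ¬ pvSep <:+: text.toList := by
      intro h
      have := (PySem.Str.isIn_iff_infix (sub := "```") (s := text)).mpr (by rwa [str_toList_sep])
      rw [this] at hin; exact Bool.noConfusion hin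
    have hfind : PySem.Chars.find text.toList pvSep = -1 :=
      (PySem.Chars.find_eq_neg_one_iff _ _).mpr hninf
    rw [splitRec, dif_pos hfind]
    simp only [gOut, List.isEmpty_nil, if_true, if_false, List.append_nil, Bool.false_eq_true]
    rw [show PySem.Str.replace text "\n\n" "\n" =
      String.ofList (PySem.Str.replace text "\n\n" "\n").toList from String.ofList_toList.symm]
    congr 1
    simp [PySem.Str.toList_replace]
    rfl
  · rw [if_neg hin, join_nil_flatten]
    have ha := aLoop_flatten text.toList 0 (by omega) false []
    simp only [List.flatten_nil, List.nil_append, List.drop_zero] at ha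
    rw [ha]

-- ===== VERDICT (by name: the statement is the Claim_ definition above) =====
theorem normalize_text_for_display_py_spec : Claim_equal_normalize_text_for_display_py := by
  intro text _
  unfold Spec_normalize_text_for_display_py
  exact main_eq text
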